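-- pv_equiv track=rewrite | github.com/nkossally/leet_code | Python/2472. Maximum Number of Non-overlapping Palindrome Substrings.py | maxPalindromesFast
-- ===== SOURCE A (Python) =====
-- def maxPalindromesFast(s, k):
--     """
--     :type s: str
--     :type k: int
--     :rtype: int
--     """
--
--     n = len(s)
--     # function to check whether substring is a palindrome
--     def valid(i, j):
--         # if end index is greater then length of string
--         if j > len(s):
--             return False
--         if s[i : j] == s[i : j][::-1]:
--             return True
--         return False
--     maxSubstrings = 0
--     start = 0
--     while start < n:
--         if valid(start, start + k):
--             maxSubstrings += 1
--             start += k
--         elif valid(start, start + k + 1):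
--             maxSubstrings += 1
--             start += k + 1
--         else:
--             # when there is no palindrome starting at that particular index
--             start += 1
--     return maxSubstrings
-- ===== SOURCE B (Python) =====
-- def maxPalindromesFast(s, k):
--     n = len(s)
--     # Stage 1: bottom-up DP over window lengths with two rolling rows.
--     # prev1[i] says whether the length-L window s[i:i+L] is a palindrome
--     # (for the current L), prev2 the same for length L-2; a length-L window
--     # is a palindrome iff its end characters match and its inner window is.
--     maxL = min(k + 1, n)
--     prev2 = [True] * (n + 1)   # length-0 windows
--     prev1 = [True] * n         # length-1 windows
--     for L in range(2, maxL + 1):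
--         cur = [x == y and p for x, y, p in zip(s, s[L - 1:], prev2[1:])]
--         prev2, prev1 = prev1, cur
--     # after the loop: prev1 = row for length maxL, prev2 = row for length maxL-1
--     okK = prev1 if k == maxL else (prev2 if k == maxL - 1 else [])
--     okK1 = prev1 if k + 1 == maxL else []
--
--     # Stage 2: greedy scan reading the precomputed tables.
--     count = 0
--     start = 0
--     while start < n:
--         if start + k <= n and okK[start]:
--             count += 1
--             start += k
--         elif start + k + 1 <= n and okK1[start]:
--             count += 1
--             start += k + 1
--         else:
--             start += 1
--     return count
-- ===== Notes on version B (the rewrite author's own statement) =====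
-- stated objective: alternative
-- what changed: B is two staged passes instead of A's interleaved scan-and-check: it first tabulates which windows of lengths up to k+1 are palindromes by a bottom-up DP with two rolling rows (a length-L window is a palindrome iff its end characters match and its inner length-(L-2) window is, reusing the previous row instead of slicing and reversing each window), then runs the greedy scan as pure O(1) table lookups.
import Mathlib
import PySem

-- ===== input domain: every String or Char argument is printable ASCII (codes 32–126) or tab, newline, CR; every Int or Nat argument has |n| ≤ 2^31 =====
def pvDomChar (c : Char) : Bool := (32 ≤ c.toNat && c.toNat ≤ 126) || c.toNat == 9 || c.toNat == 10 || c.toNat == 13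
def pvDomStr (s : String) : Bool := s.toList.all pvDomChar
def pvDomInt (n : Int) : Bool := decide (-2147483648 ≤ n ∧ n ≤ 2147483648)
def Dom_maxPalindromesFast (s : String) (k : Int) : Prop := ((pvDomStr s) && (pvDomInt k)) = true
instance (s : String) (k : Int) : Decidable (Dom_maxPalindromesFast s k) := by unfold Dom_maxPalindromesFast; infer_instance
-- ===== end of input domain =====

-- B replaces A's per-position slice-and-reverse palindrome checks by two staged passes:
-- a bottom-up DP that tabulates which windows of each length are palindromes (each length
-- reuses the length-2-smaller row), then a greedy scan that only reads the two tables.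

-- ===== PORT A =====
-- valid(i, j): False if j > len(s), else compare s[i:j] with s[i:j][::-1]
def pvValidA (cs : List Char) (i j : Int) : Bool :=
  if j > (cs.length : Int) then false
  else if PySem.List.slice cs (some i) (some j) == (PySem.List.slice cs (some i) (some j)).reverse then true
  else false

-- A's while loop; fuel n+1 suffices for every input A terminates on (each step moves start by ≥ 1)
def pvLoopA (cs : List Char) (k : Int) (fuel : Nat) (start acc : Int) : Int :=
  match fuel with
  | 0 => acc
  | fuel + 1 =>
    if start < (cs.length : Int) then
      if pvValidA cs start (start + k) then pvLoopA cs k fuel (start + k) (acc + 1)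
      else if pvValidA cs start (start + k + 1) then pvLoopA cs k fuel (start + k + 1) (acc + 1)
      else pvLoopA cs k fuel (start + 1) acc
    else acc

def maxPalindromesFast (s : String) (k : Int) : Int :=
  pvLoopA s.toList k (s.toList.length + 1) 0 0

-- ===== PORT B =====
-- one DP row via zip: [x == y and p for x, y, p in zip(s, s[L-1:], prev2[1:])]
-- (Python's 3-ary zip is the nested pair zip, truncating to the shortest list)
def pvRowZip (cs : List Char) (L : Nat) (prev2 : List Bool) : List Bool :=
  ((cs.zip (cs.drop (L - 1))).zip (prev2.drop 1)).map
    (fun xp => decide (xp.1.1 = xp.1.2) && xp.2)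

-- for L in range(2, maxL+1): cur = row; prev2, prev1 = prev1, cur
def pvRollB (cs : List Char) (maxL : Int) (prev2 prev1 : List Bool) : List Bool × List Bool :=
  (PySem.List.pyRange 2 (maxL + 1) 1).foldl
    (fun pr L => (pr.2, pvRowZip cs L.toNat pr.1)) (prev2, prev1)

-- B's greedy while loop reading the two tables; okK[start] / okK1[start] are only read
-- under the in-range guards start+k ≤ n / start+k+1 ≤ n, so .getD is exact
def pvLoopB (n k : Int) (okK okK1 : List Bool) (fuel : Nat) (start acc : Int) : Int :=
  match fuel with
  | 0 => acc
  | fuel + 1 =>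
    if start < n then
      if decide (start + k ≤ n) && okK.getD start.toNat false then
        pvLoopB n k okK okK1 fuel (start + k) (acc + 1)
      else if decide (start + k + 1 ≤ n) && okK1.getD start.toNat false then
        pvLoopB n k okK okK1 fuel (start + k + 1) (acc + 1)
      else pvLoopB n k okK okK1 fuel (start + 1) acc
    else acc

def maxPalindromesFast_alt (s : String) (k : Int) : Int :=
  let cs := s.toList
  let n : Int := cs.length
  let maxL := min (k + 1) n
  let pr := pvRollB cs maxL (List.replicate (cs.length + 1) true) (List.replicate cs.length true)
  let okK := if k = maxL then pr.2 else if k = maxL - 1 then pr.1 else []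
  let okK1 := if k + 1 = maxL then pr.2 else []
  pvLoopB n k okK okK1 (cs.length + 1) 0 0

-- ===== PRECONDITION & SPEC =====
-- Pre_ excludes only inputs on which A never returns: for k ≤ 0 and a nonempty s the greedy
-- loop's step never escapes past the end (the empty window is always a "palindrome"), so A diverges.
def Pre_maxPalindromesFast (s : String) (k : Int) : Prop := 1 ≤ k ∨ s = ""
instance (s : String) (k : Int) : Decidable (Pre_maxPalindromesFast s k) := by
  unfold Pre_maxPalindromesFast; infer_instance

def pvWitness_maxPalindromesFast : String × Int := ("aba", 2)

def Spec_maxPalindromesFast (s : String) (k : Int) (out : Int) : Prop := out = maxPalindromesFast_alt s k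
instance (s : String) (k : Int) (out : Int) : Decidable (Spec_maxPalindromesFast s k out) := by
  unfold Spec_maxPalindromesFast; infer_instance

-- ===== CLAIM (what is proved, stated in full; the proofs are below) =====
def Claim_equal_maxPalindromesFast : Prop := ∀ (s : String) (k : Int), Dom_maxPalindromesFast s k → Pre_maxPalindromesFast s k → Spec_maxPalindromesFast s k (maxPalindromesFast s k)

-- ===== LEMMAS AND PROOFS =====

-- the intended meaning of one DP row: entry i says whether the length-L window at i is a palindrome
def pvRowSpec (cs : List Char) (L : Nat) : List Bool :=
  (List.range (cs.length + 1 - L)).map (fun i =>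
    decide ((cs.drop i).take L = ((cs.drop i).take L).reverse))

-- a list of length ≤ 1 is its own reverse
theorem pv_short_reverse {t : List Char} (h : t.length ≤ 1) : t = t.reverse := by
  match t with
  | [] => rfl
  | [_] => rfl
  | _ :: _ :: _ => simp at h

-- peeling head and last off a window
theorem pv_window_decomp (cs : List Char) (a b : Nat) (hab : a < b) (hb : b < cs.length) :
    (cs.drop a).take (b + 1 - a)
      = cs[a]'(by omega) :: (((cs.drop (a + 1)).take (b - 1 - a)) ++ [cs[b]'hb]) := by
  rw [List.drop_eq_getElem_cons (by omega : a < cs.length)]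
  have h1 : b + 1 - a = (b - a) + 1 := by omega
  rw [h1, List.take_succ_cons]
  have h2 : b - a = (b - 1 - a) + 1 := by omega
  rw [h2, List.take_add_one]
  have h3 : (cs.drop (a + 1))[b - 1 - a]? = some (cs[b]'hb) := by
    rw [List.getElem?_drop]
    rw [show a + 1 + (b - 1 - a) = b from by omega]
    exact List.getElem?_eq_getElem hb
  rw [h3]
  simp

-- x :: w ++ [y] is a palindrome iff x = y and w is
theorem pv_pal_cons_concat (x y : Char) (w : List Char) :
    (x :: (w ++ [y]) = (x :: (w ++ [y])).reverse) ↔ (x = y ∧ w = w.reverse) := by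
  constructor
  · intro h
    have h' : x :: (w ++ [y]) = y :: (w.reverse ++ [x]) := by
      conv_lhs => rw [h]
      simp
    rw [List.cons_eq_cons] at h'
    obtain ⟨hxy, hw⟩ := h'
    subst hxy
    exact ⟨rfl, (List.append_left_inj [x]).mp hw⟩
  · rintro ⟨rfl, hw⟩
    conv_lhs => rw [hw]
    simp

-- reading a mapped range with a default, in range
theorem pv_getD_map_range {α : Type} (f : Nat → α) (n i : Nat) (d : α) (h : i < n) :
    ((List.range n).map f).getD i d = f i := by
  rw [List.getD_eq_getElem?_getD, List.getElem?_map, List.getElem?_range h]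
  rfl

-- reading pvRowSpec in range gives the palindrome fact
theorem pv_rowSpec_getD (cs : List Char) (L i : Nat) (d : Bool) (h : i < cs.length + 1 - L) :
    (pvRowSpec cs L).getD i d
      = decide ((cs.drop i).take L = ((cs.drop i).take L).reverse) := by
  unfold pvRowSpec
  exact pv_getD_map_range _ _ _ _ h

-- base rows are the length-0 and length-1 specs
theorem pv_rowSpec_zero (cs : List Char) :
    pvRowSpec cs 0 = List.replicate (cs.length + 1) true := by
  unfold pvRowSpec
  rw [List.eq_replicate_iff]
  constructor
  · simp
  · intro b hb
    obtain ⟨i, _, rfl⟩ := List.mem_map.mp hb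
    simp

theorem pv_rowSpec_one (cs : List Char) :
    pvRowSpec cs 1 = List.replicate cs.length true := by
  unfold pvRowSpec
  rw [List.eq_replicate_iff]
  constructor
  · simp
  · intro b hb
    obtain ⟨i, _, rfl⟩ := List.mem_map.mp hb
    rw [decide_eq_true_eq]
    apply pv_short_reverse
    have := List.length_take_le 1 (cs.drop i)
    omega

-- the DP step is correct: the zip row computed from the (L-2)-spec is the L-spec
theorem pv_rowZip_step (cs : List Char) (L : Nat) (hL2 : 2 ≤ L) (hLn : L ≤ cs.length) :
    pvRowZip cs L (pvRowSpec cs (L - 2)) = pvRowSpec cs L := by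
  have hlen2 : (pvRowSpec cs (L - 2)).length = cs.length + 1 - (L - 2) := by
    unfold pvRowSpec; simp
  apply List.ext_getElem
  · unfold pvRowZip pvRowSpec
    simp
    omega
  · intro i h1 h2
    have hi : i < cs.length + 1 - L := by
      unfold pvRowSpec at h2; simp at h2; omega
    have hiL : i + L - 1 < cs.length := by omega
    unfold pvRowZip
    rw [List.getElem_map, List.getElem_zip, List.getElem_zip, List.getElem_drop,
        List.getElem_drop]
    have hspec2 : (pvRowSpec cs (L - 2))[1 + i]'(by omega)
        = decide ((cs.drop (i + 1)).take (L - 2) = ((cs.drop (i + 1)).take (L - 2)).reverse) := by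
      unfold pvRowSpec
      rw [List.getElem_map, List.getElem_range]
      rw [show 1 + i = i + 1 from by omega]
    have hspecL : (pvRowSpec cs L)[i]'h2
        = decide ((cs.drop i).take L = ((cs.drop i).take L).reverse) := by
      unfold pvRowSpec
      rw [List.getElem_map, List.getElem_range]
    rw [hspec2, hspecL]
    have hidx : cs[L - 1 + i]'(by omega) = cs[i + L - 1]'hiL := by congr 1; omega
    have hdec := pv_window_decomp cs i (i + L - 1) (by omega) hiL
    rw [show i + L - 1 + 1 - i = L from by omega,
        show i + L - 1 - 1 - i = L - 2 from by omega] at hdec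
    rw [Bool.eq_iff_iff]
    simp only [Bool.and_eq_true, decide_eq_true_eq, hidx]
    rw [hdec, pv_pal_cons_concat]

-- the rolling fold carries exactly the last two spec rows
theorem pv_roll_eq (cs : List Char) : ∀ m : Nat, 1 ≤ m → m ≤ cs.length →
    pvRollB cs (m : Int) (List.replicate (cs.length + 1) true) (List.replicate cs.length true)
      = (pvRowSpec cs (m - 1), pvRowSpec cs m) := by
  intro m
  induction m with
  | zero => intro h _; omega
  | succ m ih =>
    intro _ hmn
    by_cases hm1 : 1 ≤ m
    · -- inductive case: m + 1 ≥ 2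
      unfold pvRollB
      rw [show ((m + 1 : Nat) : Int) + 1 = ((m : Nat) : Int) + 1 + 1 from by omega,
          PySem.List.pyRange_one_succ_right (by omega), List.foldl_append]
      have ihe := ih hm1 (by omega)
      unfold pvRollB at ihe
      rw [ihe]
      simp only [List.foldl_cons, List.foldl_nil]
      rw [show ((m : Nat) : Int) + 1 = ((m + 1 : Nat) : Int) from by omega,
          Int.toNat_natCast]
      rw [show m - 1 = (m + 1) - 2 from by omega,
          pv_rowZip_step cs (m + 1) (by omega) hmn]
      rw [show m + 1 - 1 = m from by omega]
    · -- base case m + 1 = 1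
      have hm0 : m = 0 := by omega
      subst hm0
      unfold pvRollB
      rw [show ((1 : Nat) : Int) + 1 = (2 : Int) from by norm_num,
          PySem.List.pyRange_one_eq_nil (by norm_num), List.foldl_nil]
      rw [pv_rowSpec_zero, pv_rowSpec_one]

-- A's valid(i, j) in terms of the window-palindrome fact (0 ≤ i < j)
theorem pv_validA_eq (cs : List Char) (i j : Int) (hi : 0 ≤ i) (hij : i < j) :
    pvValidA cs i j
      = (decide (j ≤ (cs.length : Int)) &&
          decide ((cs.drop i.toNat).take (j.toNat - i.toNat)
            = ((cs.drop i.toNat).take (j.toNat - i.toNat)).reverse)) := by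
  unfold pvValidA
  by_cases hj : j > (cs.length : Int)
  · rw [if_pos hj]
    have : ¬ j ≤ (cs.length : Int) := by omega
    simp [this]
  · rw [if_neg hj]
    have hjle : j ≤ (cs.length : Int) := by omega
    rw [PySem.List.slice_toNat cs hi (by omega)]
    simp only [hjle, decide_true, Bool.true_and, beq_iff_eq]
    by_cases hb : (cs.drop i.toNat).take (j.toNat - i.toNat)
        = ((cs.drop i.toNat).take (j.toNat - i.toNat)).reverse
    · rw [if_pos hb]
      exact (decide_eq_true hb).symm
    · rw [if_neg hb]
      exact (decide_eq_false hb).symm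

-- the two loops agree step by step, given tables that read back the palindrome facts
theorem pv_loop_eq (cs : List Char) (k : Int) (okK okK1 : List Bool)
    (hk : 1 ≤ k)
    (hK : ∀ start : Int, 0 ≤ start → start + k ≤ (cs.length : Int) →
      okK.getD start.toNat false
        = decide ((cs.drop start.toNat).take k.toNat
            = ((cs.drop start.toNat).take k.toNat).reverse))
    (hK1 : ∀ start : Int, 0 ≤ start → start + k + 1 ≤ (cs.length : Int) →
      okK1.getD start.toNat false
        = decide ((cs.drop start.toNat).take (k + 1).toNat
            = ((cs.drop start.toNat).take (k + 1).toNat).reverse)) :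
    ∀ (fuel : Nat) (start acc : Int), 0 ≤ start →
      pvLoopA cs k fuel start acc = pvLoopB (cs.length : Int) k okK okK1 fuel start acc := by
  intro fuel
  induction fuel with
  | zero => intro start acc _; rfl
  | succ fuel ih =>
    intro start acc hs
    rw [pvLoopA, pvLoopB]
    have hc1 : pvValidA cs start (start + k)
        = (decide (start + k ≤ (cs.length : Int)) && okK.getD start.toNat false) := by
      rw [pv_validA_eq cs start (start + k) hs (by omega)]
      by_cases h : start + k ≤ (cs.length : Int)
      · rw [hK start hs h, show (start + k).toNat - start.toNat = k.toNat from by omega]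
      · rw [decide_eq_false h, Bool.false_and, Bool.false_and]
    have hc2 : pvValidA cs start (start + k + 1)
        = (decide (start + k + 1 ≤ (cs.length : Int)) && okK1.getD start.toNat false) := by
      rw [pv_validA_eq cs start (start + k + 1) hs (by omega)]
      by_cases h : start + k + 1 ≤ (cs.length : Int)
      · rw [hK1 start hs h, show (start + k + 1).toNat - start.toNat = (k + 1).toNat from by omega]
      · rw [decide_eq_false h, Bool.false_and, Bool.false_and]
    rw [hc1, hc2]
    split_ifs
    · exact ih (start + k) (acc + 1) (by omega)
    · exact ih (start + k + 1) (acc + 1) (by omega)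
    · exact ih (start + 1) acc (by omega)
    · rfl

-- ===== VERDICT (by name: the statement is the Claim_ definition above) =====
theorem maxPalindromesFast_spec : Claim_equal_maxPalindromesFast := by
  intro s k _ hpre
  unfold Spec_maxPalindromesFast maxPalindromesFast maxPalindromesFast_alt
  rcases hpre with hk | hs
  · set cs := s.toList with hcs
    set n : Int := (cs.length : Int) with hn
    set maxL := min (k + 1) n with hmaxL
    set pr := pvRollB cs maxL (List.replicate (cs.length + 1) true)
      (List.replicate cs.length true) with hpr
    set okK := if k = maxL then pr.2 else if k = maxL - 1 then pr.1 else [] with hokK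
    set okK1 := if k + 1 = maxL then pr.2 else [] with hokK1
    have hpr_eq : 1 ≤ n → k ≤ n →
        pr = (pvRowSpec cs (maxL.toNat - 1), pvRowSpec cs maxL.toNat) := by
      intro h1 h2
      rw [hpr, show maxL = ((maxL.toNat : Nat) : Int) from by omega]
      exact pv_roll_eq cs maxL.toNat (by omega) (by omega)
    apply pv_loop_eq cs k okK okK1 hk
    · intro start hst hle
      have hkn : k ≤ n := by omega
      rw [hpr_eq (by omega) hkn] at hokK
      by_cases hc : k + 1 ≤ n
      · have hm : maxL = k + 1 := by omega
        rw [hokK, if_neg (by omega), if_pos (by omega),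
            show maxL.toNat - 1 = k.toNat from by omega]
        exact pv_rowSpec_getD cs k.toNat start.toNat false (by omega)
      · have hm : maxL = k := by omega
        rw [hokK, if_pos hm.symm, show maxL.toNat = k.toNat from by omega]
        exact pv_rowSpec_getD cs k.toNat start.toNat false (by omega)
    · intro start hst hle
      have hm : maxL = k + 1 := by omega
      rw [hpr_eq (by omega) (by omega)] at hokK1
      rw [hokK1, if_pos hm.symm, show maxL.toNat = (k + 1).toNat from by omega]
      exact pv_rowSpec_getD cs (k + 1).toNat start.toNat false (by omega)
    · omega
  · subst hs
    rfl
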